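-- pv_equiv track=rewrite | github.com/ctjian/ai_tool_platform | backend/app/custom_tools/arxiv_translate/splitter.py | _post_process_chunks
-- ===== SOURCE A (Python) =====
-- from typing import List
--
-- SHORT_SEGMENT_MIN_CHARS = 42
--
-- def _post_process_chunks(chunks: List[tuple[str, bool]]) -> List[tuple[str, bool]]:
--     """
--     Lightweight post-process aligned with GPT-Academic:
--     1) very short transform chunks are preserved
--     2) adjacent chunks with same flag are merged
--     """
--     adjusted: List[tuple[str, bool]] = []
--     for text, translatable in chunks:
--         flag = bool(translatable)
--         if flag:
--             core = text.strip("\n").strip()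
--             if len(core) < SHORT_SEGMENT_MIN_CHARS:
--                 flag = False
--         adjusted.append((text, flag))
--
--     merged: List[tuple[str, bool]] = []
--     for text, flag in adjusted:
--         if not merged:
--             merged.append((text, flag))
--             continue
--         prev_text, prev_flag = merged[-1]
--         if prev_flag == flag:
--             merged[-1] = (prev_text + text, flag)
--         else:
--             merged.append((text, flag))
--     return merged
-- ===== SOURCE B (Python) =====
-- from typing import List
--
-- SHORT_SEGMENT_MIN_CHARS = 42
--
-- def _post_process_chunks(chunks: List[tuple[str, bool]]) -> List[tuple[str, bool]]:
--     # Staged index-based plan: compute the flag table, find the run boundaries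
--     # (indices where the flag changes), then emit one joined slice per run.
--     n = len(chunks)
--     flags = [bool(b) and len(t.strip("\n").strip()) >= SHORT_SEGMENT_MIN_CHARS
--              for t, b in chunks]
--     starts = [i for i in range(n) if i == 0 or flags[i] != flags[i - 1]]
--     return [("".join(t for t, _ in chunks[a:b]), flags[a])
--             for a, b in zip(starts, starts[1:] + [n])]
-- ===== Notes on version B (the rewrite author's own statement) =====
-- stated objective: alternative
-- what changed: Instead of A's stateful accumulator loop that mutates merged[-1], B computes the flag table, then the list of run-boundary indices (positions where the flag changes), and emits one joined slice of chunks per boundary pair.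
import Mathlib
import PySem

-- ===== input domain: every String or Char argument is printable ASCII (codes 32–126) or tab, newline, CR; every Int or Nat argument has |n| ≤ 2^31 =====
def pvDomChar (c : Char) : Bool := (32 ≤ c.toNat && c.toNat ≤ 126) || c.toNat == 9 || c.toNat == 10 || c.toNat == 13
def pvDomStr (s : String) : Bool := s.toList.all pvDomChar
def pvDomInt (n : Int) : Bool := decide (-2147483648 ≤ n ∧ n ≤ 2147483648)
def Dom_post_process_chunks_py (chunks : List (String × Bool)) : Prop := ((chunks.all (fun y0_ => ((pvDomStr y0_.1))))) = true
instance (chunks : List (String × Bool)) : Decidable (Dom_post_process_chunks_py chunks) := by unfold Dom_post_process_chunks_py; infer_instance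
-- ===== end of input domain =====

-- B replaces A's stateful merge loop (which mutates merged[-1]) by a staged index plan:
-- flag table, run-boundary indices, then one joined slice per boundary pair; objective: alternative.

-- ===== PORT A =====
-- the merge loop keeps `merged` with its LAST element at the head (Python mutates merged[-1]),
-- reversed at the end
def post_process_chunks_py (chunks : List (String × Bool)) : List (String × Bool) :=
  let adjusted : List (String × Bool) :=
    chunks.foldl (fun acc p =>
      let flag := p.2
      let flag :=
        if flag then
          if PySem.Str.len (PySem.Str.strip (PySem.Str.stripChars p.1 "\n")) < 42 then false
          else flag
        else flag
      acc ++ [(p.1, flag)]) []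
  let merged : List (String × Bool) :=
    adjusted.foldl (fun merged p =>
      match merged with
      | [] => [p]
      | (prevText, prevFlag) :: rest =>
          if prevFlag == p.2 then (prevText ++ p.1, p.2) :: rest
          else p :: (prevText, prevFlag) :: rest) []
  merged.reverse

-- ===== PORT B =====
def pvFlagB (p : String × Bool) : Bool :=
  p.2 && decide (42 ≤ PySem.Str.len (PySem.Str.strip (PySem.Str.stripChars p.1 "\n")))

def post_process_chunks_py_alt (chunks : List (String × Bool)) : List (String × Bool) :=
  let n : Int := chunks.length
  let flags : List Bool := chunks.map pvFlagB
  -- indices i in range(n) with i == 0 or flags[i] != flags[i-1]; all indexing is in range,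
  -- pyGetD is exact here (the i-1 access is only reached when i ≠ 0, as in Python's `or`)
  let starts : List Int := (PySem.List.pyRange 0 n 1).filter
      (fun i => i == 0 || (PySem.List.pyGetD flags i false != PySem.List.pyGetD flags (i-1) false))
  (starts.zip (starts.drop 1 ++ [n])).map (fun ab =>
    (PySem.Str.join "" ((PySem.List.slice chunks (some ab.1) (some ab.2)).map Prod.fst),
     PySem.List.pyGetD flags ab.1 false))

-- ===== PRECONDITION & SPEC =====
def Spec_post_process_chunks_py (chunks : List (String × Bool)) (out : List (String × Bool)) : Prop := out = post_process_chunks_py_alt chunks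
instance (chunks : List (String × Bool)) (out : List (String × Bool)) : Decidable (Spec_post_process_chunks_py chunks out) := by unfold Spec_post_process_chunks_py; infer_instance

-- ===== CLAIM (what is proved, stated in full; the proofs are below) =====
def Claim_equal_post_process_chunks_py : Prop := ∀ (chunks : List (String × Bool)), Dom_post_process_chunks_py chunks → Spec_post_process_chunks_py chunks (post_process_chunks_py chunks)

-- ===== LEMMAS AND PROOFS =====

-- the common flag-annotated list both sides are about
def pvAdj (chunks : List (String × Bool)) : List (String × Bool) :=
  chunks.map (fun p => (p.1, pvFlagB p))

-- run decomposition: the maximal prefix whose flag equals f (its texts, and the remainder)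
def pvTakeRun (f : Bool) : List (String × Bool) → List String × List (String × Bool)
  | [] => ([], [])
  | (t, g) :: rest =>
      if g == f then
        let r := pvTakeRun f rest
        (t :: r.1, r.2)
      else ([], (t, g) :: rest)

theorem pvTakeRun_len (f : Bool) (l : List (String × Bool)) :
    (pvTakeRun f l).2.length ≤ l.length := by
  induction l with
  | nil => simp [pvTakeRun]
  | cons p rest ih =>
      obtain ⟨t, g⟩ := p
      simp only [pvTakeRun]
      split
      · exact Nat.le_succ_of_le ih
      · simp

def pvGroups : List (String × Bool) → List (String × Bool)
  | [] => []
  | (t, f) :: rest =>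
      let r := pvTakeRun f rest
      (PySem.Str.join "" (t :: r.1), f) :: pvGroups r.2
termination_by l => l.length
decreasing_by
  exact Nat.lt_succ_of_le (pvTakeRun_len f rest)

-- ---------- A-side: A computes pvGroups ∘ pvAdj ----------

theorem pvFlag_eq (p : String × Bool) :
    (let flag := p.2
     if flag then
       if PySem.Str.len (PySem.Str.strip (PySem.Str.stripChars p.1 "\n")) < 42 then false
       else flag
     else flag) = pvFlagB p := by
  obtain ⟨t, b⟩ := p
  cases b <;> simp [pvFlagB]
  rw [← decide_not]
  exact decide_eq_decide.mpr (by omega)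

theorem pvAdjusted_eq (g : String × Bool → String × Bool) (chunks : List (String × Bool))
    (acc : List (String × Bool)) :
    chunks.foldl (fun acc p => acc ++ [g p]) acc = acc ++ chunks.map g := by
  induction chunks generalizing acc with
  | nil => simp
  | cons p rest ih => simp [List.foldl, ih]

theorem pvJoin_append (a b : String) (ts : List String) :
    PySem.Str.join "" ((a ++ b) :: ts) = PySem.Str.join "" (a :: b :: ts) := by
  apply String.toList_inj.mp
  cases ts with
  | nil => simp [PySem.Str.toList_join, PySem.Chars.join_singleton, PySem.Chars.join_cons_cons]
  | cons c cs => simp [PySem.Str.toList_join, PySem.Chars.join_cons_cons]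

-- A's merge step
def pvStep (merged : List (String × Bool)) (p : String × Bool) : List (String × Bool) :=
  match merged with
  | [] => [p]
  | (prevText, prevFlag) :: rest =>
      if prevFlag == p.2 then (prevText ++ p.1, p.2) :: rest
      else p :: (prevText, prevFlag) :: rest

-- invariant of A's merge loop vs. the run splitting
theorem pvMerge_inv (l : List (String × Bool)) :
    ∀ (t : String) (f : Bool) (acc : List (String × Bool)),
    (l.foldl pvStep ((t, f) :: acc)).reverse =
      acc.reverse ++ (PySem.Str.join "" (t :: (pvTakeRun f l).1), f) :: pvGroups (pvTakeRun f l).2 := by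
  induction l with
  | nil =>
      intro t f acc
      simp [pvTakeRun, pvGroups, PySem.Str.join]
  | cons p rest ih =>
      intro t f acc
      obtain ⟨t', g⟩ := p
      by_cases h : g = f
      · subst h
        simp only [List.foldl, pvStep, pvTakeRun, BEq.rfl, if_true]
        rw [ih (t ++ t') g acc]
        simp [pvJoin_append]
      · have hgf : (g == f) = false := by simp [h]
        have hfg : (f == g) = false := by simp [Ne.symm h]
        simp only [List.foldl, pvStep, hfg, Bool.false_eq_true, if_false]
        rw [ih t' g ((t, f) :: acc)]
        simp [pvTakeRun, hgf, pvGroups, PySem.Str.join]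

theorem pvA_eq (chunks : List (String × Bool)) :
    post_process_chunks_py chunks = pvGroups (pvAdj chunks) := by
  unfold post_process_chunks_py
  simp only []
  rw [show (fun (acc : List (String × Bool)) (p : String × Bool) =>
        acc ++ [(p.1,
          let flag := p.2
          if flag then
            if PySem.Str.len (PySem.Str.strip (PySem.Str.stripChars p.1 "\n")) < 42 then false
            else flag
          else flag)]) =
      (fun acc p => acc ++ [(p.1, pvFlagB p)]) from by
        funext acc p; rw [pvFlag_eq p]]
  rw [pvAdjusted_eq (fun p => (p.1, pvFlagB p)) chunks []]
  simp only [List.nil_append]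
  show (List.foldl pvStep [] (pvAdj chunks)).reverse = pvGroups (pvAdj chunks)
  cases h : pvAdj chunks with
  | nil => simp [pvGroups]
  | cons q rest =>
      obtain ⟨t, f⟩ := q
      rw [List.foldl_cons]
      show (List.foldl pvStep ((t, f) :: []) rest).reverse = _
      rw [pvMerge_inv rest t f []]
      simp [pvGroups]

-- ---------- B-side: the boundary plan computes pvGroups ∘ pvAdj too ----------

-- Nat-level mirror of B's pipeline
def pvNatStarts (F : List Bool) : List Nat :=
  (List.range F.length).filter (fun i => i == 0 || (F.getD i false != F.getD (i - 1) false))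

def pvNatBody (am : List (String × Bool)) : List (String × Bool) :=
  let F := am.map Prod.snd
  let s := pvNatStarts F
  (s.zip (s.drop 1 ++ [am.length])).map (fun ab =>
    (PySem.Str.join "" (((am.drop ab.1).take (ab.2 - ab.1)).map Prod.fst), F.getD ab.1 false))

theorem pvStarts_cast (F : List Bool) (m : Nat) (hm : m = F.length) :
    (PySem.List.pyRange 0 (m : Int) 1).filter
        (fun i => i == 0 || (PySem.List.pyGetD F i false != PySem.List.pyGetD F (i - 1) false))
      = (pvNatStarts F).map (fun (k : Nat) => (k : Int)) := by
  subst hm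
  rw [PySem.List.pyRange_one]
  rw [show (((F.length : Int) - 0).toNat) = F.length from by simp]
  rw [show (fun (k : Nat) => (0 : Int) + (k : Int)) = (fun (k : Nat) => (k : Int)) from by
    funext k; ring]
  rw [List.filter_map]
  unfold pvNatStarts
  have hcond : ∀ k ∈ List.range F.length,
      ((fun i => i == 0 || (PySem.List.pyGetD F i false != PySem.List.pyGetD F (i - 1) false)) ∘
        (fun (k : Nat) => (k : Int))) k
      = (fun i => i == 0 || (F.getD i false != F.getD (i - 1) false)) k := by
    intro k _
    cases k with
    | zero => simp [Function.comp]
    | succ j =>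
        simp only [Function.comp]
        rw [show ((j + 1 : Nat) : Int) - 1 = ((j : Nat) : Int) from by push_cast; ring,
            PySem.List.pyGetD_natCast, PySem.List.pyGetD_natCast]
        have hL : ((((j + 1 : Nat) : Int)) == (0 : Int)) = false := by
          rw [beq_eq_false_iff_ne]
          exact_mod_cast Nat.succ_ne_zero j
        have hR : (((j + 1 : Nat)) == (0 : Nat)) = false := by simp
        rw [hL, hR, Bool.false_or, Bool.false_or, Nat.add_sub_cancel]
  rw [List.filter_congr hcond]

theorem pvAlt_eq (chunks : List (String × Bool)) :
    post_process_chunks_py_alt chunks = pvNatBody (pvAdj chunks) := by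
  have hF : (pvAdj chunks).map Prod.snd = chunks.map pvFlagB := by
    simp [pvAdj, List.map_map, Function.comp]
  have hlen : (pvAdj chunks).length = chunks.length := by simp [pvAdj]
  simp only [post_process_chunks_py_alt, pvNatBody, hF, hlen]
  rw [pvStarts_cast (chunks.map pvFlagB) chunks.length (by simp)]
  rw [show ([((chunks.length : Nat) : Int)])
      = ([chunks.length].map (fun (k : Nat) => (k : Int))) from rfl]
  rw [show (((pvNatStarts (chunks.map pvFlagB)).map (fun (k : Nat) => (k : Int))).drop 1)
      = (((pvNatStarts (chunks.map pvFlagB)).drop 1).map (fun (k : Nat) => (k : Int))) from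
    (List.map_drop).symm]
  rw [← List.map_append, List.zip_map, List.map_map]
  apply List.map_congr_left
  intro ab _
  obtain ⟨a, b⟩ := ab
  simp only [Function.comp, Prod.map]
  rw [Prod.mk.injEq]
  refine ⟨?_, ?_⟩
  · rw [PySem.List.slice_natCast,
        show (pvAdj chunks).drop a = (chunks.drop a).map (fun p => (p.1, pvFlagB p)) from
          (List.map_drop).symm,
        ← List.map_take, List.map_map]
    exact congrArg (PySem.Str.join "") (List.map_congr_left (fun p _ => rfl))
  · simp

-- run decomposition facts
theorem pvTakeRun_decomp (f : Bool) (l : List (String × Bool)) :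
    ∃ pre, l = pre ++ (pvTakeRun f l).2 ∧ (pvTakeRun f l).1 = pre.map Prod.fst ∧
      ∀ p ∈ pre, p.2 = f := by
  induction l with
  | nil => exact ⟨[], by simp [pvTakeRun]⟩
  | cons p rest ih =>
      obtain ⟨t, g⟩ := p
      by_cases h : g = f
      · subst h
        obtain ⟨pre, h1, h2, h3⟩ := ih
        refine ⟨(t, g) :: pre, ?_, ?_, ?_⟩
        · simp only [pvTakeRun, BEq.rfl, if_true]
          rw [List.cons_append, ← h1]
        · simp [pvTakeRun, h2]
        · intro q hq
          rcases List.mem_cons.mp hq with rfl | hq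
          · rfl
          · exact h3 q hq
      · have hgf : (g == f) = false := by simp [h]
        exact ⟨[], by simp [pvTakeRun, hgf]⟩

theorem pvTakeRun_head (f : Bool) (l : List (String × Bool)) (q : String × Bool)
    (hq : (pvTakeRun f l).2.head? = some q) : q.2 ≠ f := by
  induction l with
  | nil => simp [pvTakeRun] at hq
  | cons p rest ih =>
      obtain ⟨t, g⟩ := p
      by_cases h : g = f
      · subst h
        simp only [pvTakeRun, BEq.rfl, if_true] at hq
        exact ih hq
      · have hgf : (g == f) = false := by simp [h]
        simp only [pvTakeRun, hgf, Bool.false_eq_true, if_false, List.head?_cons,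
          Option.some_inj] at hq
        subst hq
        exact h

-- getD over a replicate-prefixed list
theorem pvGetD_rep_lt (r i : Nat) (h : i < r) (f : Bool) (G : List Bool) :
    (List.replicate r f ++ G).getD i false = f := by
  rw [List.getD_eq_getElem?_getD, List.getElem?_append_left (by simpa using h)]
  simp [h]

theorem pvGetD_rep_right (r k : Nat) (f : Bool) (G : List Bool) :
    (List.replicate r f ++ G).getD (r + k) false = G.getD k false := by
  rw [List.getD_eq_getElem?_getD,
      List.getElem?_append_right (by simp), List.getD_eq_getElem?_getD]
  simp

-- the boundary list of a replicate-prefixed flag table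
theorem pvStarts_shift (r : Nat) (hr : 1 ≤ r) (f : Bool) (G : List Bool)
    (hG : G ≠ [] → G.getD 0 false ≠ f) :
    pvNatStarts (List.replicate r f ++ G) = 0 :: (pvNatStarts G).map (fun k => r + k) := by
  unfold pvNatStarts
  have hlen : (List.replicate r f ++ G).length = r + G.length := by simp
  rw [hlen, List.range_add, List.filter_append]
  have h1 : (List.range r).filter
      (fun i => i == 0 || ((List.replicate r f ++ G).getD i false != (List.replicate r f ++ G).getD (i - 1) false)) = [0] := by
    obtain ⟨r', rfl⟩ : ∃ r', r = r' + 1 := ⟨r - 1, by omega⟩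
    rw [List.range_succ_eq_map, List.filter_cons]
    simp only [show ((0 : Nat) == 0) = true from rfl, Bool.true_or, if_true]
    congr 1
    rw [List.filter_map, List.filter_eq_nil_iff.mpr, List.map_nil]
    intro k hk
    have hk' : k < r' := by simpa using hk
    simp only [Function.comp]
    rw [show Nat.succ k = k + 1 from rfl, pvGetD_rep_lt _ _ (by omega),
        show k + 1 - 1 = k from rfl, pvGetD_rep_lt _ _ (by omega)]
    simp
  have h2 : ((List.range G.length).map (fun k => r + k)).filter
      (fun i => i == 0 || ((List.replicate r f ++ G).getD i false != (List.replicate r f ++ G).getD (i - 1) false))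
      = ((List.range G.length).filter
          (fun i => i == 0 || (G.getD i false != G.getD (i - 1) false))).map (fun k => r + k) := by
    rw [List.filter_map]
    congr 1
    apply List.filter_congr
    intro k hk
    have hkG : k < G.length := by simpa using hk
    have hGne : G ≠ [] := by intro hnil; rw [hnil] at hkG; simp at hkG
    have hr0 : ((r + k) == 0) = false := by simp; omega
    simp only [Function.comp]
    cases k with
    | zero =>
        have e1 : (List.replicate r f ++ G).getD (r + 0) false = G.getD 0 false :=
          pvGetD_rep_right r 0 f G
        have e2 : r + 0 - 1 = r - 1 := by omega
        have e3 : (List.replicate r f ++ G).getD (r - 1) false = f :=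
          pvGetD_rep_lt r (r - 1) (by omega) f G
        have e4 : (G.getD 0 false != f) = true := by
          have h5 := hG hGne
          cases hc : G.getD 0 false <;> cases hf : f <;> simp_all
        rw [hr0, e1, e2, e3, Bool.false_or,
            show ((0 : Nat) == 0) = true from rfl, Bool.true_or]
        exact e4
    | succ j =>
        have e1 : (List.replicate r f ++ G).getD (r + (j + 1)) false = G.getD (j + 1) false :=
          pvGetD_rep_right r (j + 1) f G
        have e2 : r + (j + 1) - 1 = r + j := by omega
        have e3 : (List.replicate r f ++ G).getD (r + j) false = G.getD j false :=
          pvGetD_rep_right r j f G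
        rw [hr0, e1, e2, e3, Bool.false_or]
        simp
  rw [h1, h2]
  rfl

theorem pvMap_snd_run (pre : List (String × Bool)) (f : Bool) (h : ∀ p ∈ pre, p.2 = f) :
    pre.map Prod.snd = List.replicate pre.length f := by
  have h2 : pre.map Prod.snd = List.replicate (pre.map Prod.snd).length f := by
    apply List.eq_replicate_of_mem
    intro b hb
    obtain ⟨p, hp, rfl⟩ := List.mem_map.mp hb
    exact h p hp
  simpa using h2

theorem pvNatStarts_ne_nil (G : List Bool) (h : G ≠ []) :
    ∃ s'', pvNatStarts G = 0 :: s'' := by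
  obtain ⟨x, G', rfl⟩ := List.exists_cons_of_ne_nil h
  unfold pvNatStarts
  rw [show (x :: G').length = G'.length + 1 from rfl, List.range_succ_eq_map, List.filter_cons]
  simp only [show ((0 : Nat) == 0) = true from rfl, Bool.true_or, if_true]
  exact ⟨_, rfl⟩

theorem pvNatBody_eq_groups (N : Nat) :
    ∀ am : List (String × Bool), am.length ≤ N → pvNatBody am = pvGroups am := by
  induction N with
  | zero =>
      intro am h
      rw [List.length_eq_zero_iff.mp (Nat.le_zero.mp h)]
      simp [pvNatBody, pvNatStarts, pvGroups]
  | succ N ih =>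
      intro am ham
      cases am with
      | nil => simp [pvNatBody, pvNatStarts, pvGroups]
      | cons p rest =>
          obtain ⟨t, f⟩ := p
          obtain ⟨pre, hdec, hts, hpf⟩ := pvTakeRun_decomp f rest
          have ham2 : (t, f) :: rest = (((t, f) :: pre) ++ (pvTakeRun f rest).2) := by
            rw [List.cons_append, ← hdec]
          have hF : ((t, f) :: rest).map Prod.snd
              = List.replicate (pre.length + 1) f ++ (pvTakeRun f rest).2.map Prod.snd := by
            conv_lhs => rw [ham2]
            simp [pvMap_snd_run pre f hpf, List.replicate_succ]
          have hG0 : (pvTakeRun f rest).2.map Prod.snd ≠ [] →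
              ((pvTakeRun f rest).2.map Prod.snd).getD 0 false ≠ f := by
            intro hne
            cases hrest : (pvTakeRun f rest).2 with
            | nil =>
                exact absurd (show (pvTakeRun f rest).2.map Prod.snd = [] by rw [hrest]; rfl) hne
            | cons q rs =>
                have hq := pvTakeRun_head f rest q (by rw [hrest]; rfl)
                simpa using hq
          have hstarts : pvNatStarts (((t, f) :: rest).map Prod.snd)
              = 0 :: (pvNatStarts ((pvTakeRun f rest).2.map Prod.snd)).map
                  (fun k => (pre.length + 1) + k) := by
            rw [hF]
            exact pvStarts_shift (pre.length + 1) (by omega) f _ hG0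
          have hlen2 : ((t, f) :: rest).length
              = (pre.length + 1) + (pvTakeRun f rest).2.length := by
            conv_lhs => rw [ham2]
            simp
            omega
          have hih : pvNatBody (pvTakeRun f rest).2 = pvGroups (pvTakeRun f rest).2 := by
            apply ih
            omega
          simp only [pvNatBody, hstarts]
          rcases hs : pvNatStarts ((pvTakeRun f rest).2.map Prod.snd) with _ | ⟨c, s3⟩
          · -- no runs after the first: the remainder is empty
            have hGnil : (pvTakeRun f rest).2.map Prod.snd = [] := by
              by_contra hne
              obtain ⟨s'', h0⟩ := pvNatStarts_ne_nil _ hne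
              rw [hs] at h0
              exact List.cons_ne_nil _ _ h0.symm
            have hrestnil : (pvTakeRun f rest).2 = [] := List.map_eq_nil_iff.mp hGnil
            have hlen3 : ((t, f) :: rest).length = pre.length + 1 := by
              rw [hlen2, hrestnil]
              simp
            rw [hlen3]
            simp only [List.map_nil, List.drop_succ_cons, List.drop_nil, List.nil_append,
              List.zip_cons_cons, List.zip_nil_right, List.map_cons, List.map_nil]
            have htake : ((t, f) :: rest).take (pre.length + 1) = (t, f) :: pre := by
              conv_lhs => rw [ham2, hrestnil]
              rw [List.append_nil]
              exact List.take_of_length_le (by simp)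
            rw [pvGroups, hrestnil]
            rw [show pvGroups [] = [] from by simp [pvGroups]]
            simp only [Nat.sub_zero, List.drop_zero, htake]
            rw [hts]
            rfl
          · -- at least one more run
            have hGne : (pvTakeRun f rest).2.map Prod.snd ≠ [] := by
              intro hnil
              rw [hnil] at hs
              simp [pvNatStarts] at hs
            obtain ⟨s3', h0⟩ := pvNatStarts_ne_nil _ hGne
            rw [hs] at h0
            have hc : c = 0 := (List.cons_eq_cons.mp h0).1
            subst hc
            rw [hlen2]
            rw [show (0 :: ((0 :: s3).map (fun k => (pre.length + 1) + k))).drop 1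
                = (0 :: s3).map (fun k => (pre.length + 1) + k) from rfl]
            rw [show ((0 :: s3).map (fun k => (pre.length + 1) + k)
                  ++ [(pre.length + 1) + (pvTakeRun f rest).2.length])
                = ((pre.length + 1) + 0)
                    :: ((s3 ++ [(pvTakeRun f rest).2.length]).map (fun k => (pre.length + 1) + k)) from by
              simp]
            rw [show ((0 :: s3).map (fun k => (pre.length + 1) + k))
                = ((pre.length + 1) + 0) :: (s3.map (fun k => (pre.length + 1) + k)) from rfl]
            rw [List.zip_cons_cons, List.map_cons]
            have htake : ((t, f) :: rest).take (pre.length + 1) = (t, f) :: pre := by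
              conv_lhs => rw [ham2]
              have hl : ((t, f) :: pre).length = pre.length + 1 := by simp
              rw [← hl, List.take_left]
            have hhead : ((PySem.Str.join ""
                  (((((t, f) :: rest).drop 0).take ((pre.length + 1) + 0 - 0)).map Prod.fst)),
                (((t, f) :: rest).map Prod.snd).getD 0 false)
                = (PySem.Str.join "" (t :: (pvTakeRun f rest).1), f) := by
              rw [Prod.mk.injEq]
              refine ⟨?_, ?_⟩
              · rw [List.drop_zero, Nat.sub_zero, Nat.add_zero, htake]
                rw [hts]
                rfl
              · rw [hF]
                exact pvGetD_rep_lt (pre.length + 1) 0 (by omega) f _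
            rw [hhead]
            have htail : ∀ ab : Nat × Nat,
                ((fun ab => ((PySem.Str.join ""
                    (((((t, f) :: rest).drop ab.1).take (ab.2 - ab.1)).map Prod.fst)),
                  (((t, f) :: rest).map Prod.snd).getD ab.1 false))
                    ∘ (Prod.map (fun k => (pre.length + 1) + k) (fun k => (pre.length + 1) + k))) ab
                = (fun ab => ((PySem.Str.join ""
                    ((((pvTakeRun f rest).2.drop ab.1).take (ab.2 - ab.1)).map Prod.fst)),
                  ((pvTakeRun f rest).2.map Prod.snd).getD ab.1 false)) ab := by
              intro ab
              obtain ⟨a, b⟩ := ab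
              simp only [Function.comp, Prod.map]
              rw [Prod.mk.injEq]
              refine ⟨?_, ?_⟩
              · rw [show (pre.length + 1) + b - ((pre.length + 1) + a) = b - a from by omega]
                congr 2
                conv_lhs => rw [ham2]
                rw [show (pre.length + 1) + a = ((t, f) :: pre).length + a from by simp,
                    List.drop_length_add_append]
              · rw [hF]
                exact pvGetD_rep_right (pre.length + 1) a f _
            rw [show (((pre.length + 1 + 0) :: List.map (fun k => pre.length + 1 + k) s3))
                = List.map (fun k => pre.length + 1 + k) (0 :: s3) from rfl,
              List.zip_map, List.map_map, List.map_congr_left (fun ab _ => htail ab)]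
            have hrem : (List.map (fun ab => ((PySem.Str.join ""
                    ((((pvTakeRun f rest).2.drop ab.1).take (ab.2 - ab.1)).map Prod.fst)),
                  ((pvTakeRun f rest).2.map Prod.snd).getD ab.1 false))
                ((0 :: s3).zip (s3 ++ [(pvTakeRun f rest).2.length])))
                = pvNatBody (pvTakeRun f rest).2 := by
              simp only [pvNatBody, hs]
              rfl
            rw [hrem, hih, pvGroups]

-- ===== VERDICT (by name: the statement is the Claim_ definition above) =====
theorem post_process_chunks_py_spec : Claim_equal_post_process_chunks_py := by
  intro chunks _
  unfold Spec_post_process_chunks_py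
  rw [pvA_eq, pvAlt_eq, pvNatBody_eq_groups (pvAdj chunks).length (pvAdj chunks) le_rfl]
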